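-- pv_equiv track=rewrite | github.com/akravc/dafny-sketcher | vfp/bench_effectful_plan.py | _summary_counts
-- ===== SOURCE A (Python) =====
-- def _summary_counts(stats):
--     return {
--         "empty_proof_works": len([v for v in stats.values() if isinstance(v, int) and v == -1]),
--         "inductive_proof_sketch_works": len([v for v in stats.values() if isinstance(v, int) and v == 0]),
--         "llm_plan_works": len([v for v in stats.values() if isinstance(v, int) and v == 1]),
--         "unsolved": len([v for v in stats.values() if isinstance(v, int) and v == 2]),
--         "axioms": len([v for v in stats.values() if isinstance(v, int) and v == -2]),
--     }
-- ===== SOURCE B (Python) =====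
-- def _summary_counts(stats):
--     counts = {}
--     for v in stats.values():
--         if isinstance(v, int):
--             counts[v] = counts.get(v, 0) + 1
--     return {
--         "empty_proof_works": counts.get(-1, 0),
--         "inductive_proof_sketch_works": counts.get(0, 0),
--         "llm_plan_works": counts.get(1, 0),
--         "unsolved": counts.get(2, 0),
--         "axioms": counts.get(-2, 0),
--     }
-- ===== Notes on version B (the rewrite author's own statement) =====
-- stated objective: simpler
-- what changed: Replaces five separate list-comprehension scans of stats.values() with one counting pass into a dict, then five constant-time lookups.
import Mathlib
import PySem

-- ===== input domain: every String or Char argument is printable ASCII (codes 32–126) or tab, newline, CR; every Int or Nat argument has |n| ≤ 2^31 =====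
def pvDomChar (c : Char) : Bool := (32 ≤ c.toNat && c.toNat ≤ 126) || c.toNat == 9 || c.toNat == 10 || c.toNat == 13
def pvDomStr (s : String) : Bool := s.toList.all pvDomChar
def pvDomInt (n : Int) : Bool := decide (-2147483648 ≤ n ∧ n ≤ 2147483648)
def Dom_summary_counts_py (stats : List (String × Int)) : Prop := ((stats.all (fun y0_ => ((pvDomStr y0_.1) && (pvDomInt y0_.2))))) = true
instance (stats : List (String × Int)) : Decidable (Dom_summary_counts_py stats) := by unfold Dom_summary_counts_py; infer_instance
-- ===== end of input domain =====

-- ===== PORT A =====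
-- Literal port of A: five list-comprehension scans of stats.values(); values are Int,
-- so the Python isinstance(v, int) test is always true and drops out of the port.
def summary_counts_py (stats : List (String × Int)) : List (String × Int) :=
  [("empty_proof_works", (((stats.map Prod.snd).filter (fun v => v == -1)).length : Int)),
   ("inductive_proof_sketch_works", (((stats.map Prod.snd).filter (fun v => v == 0)).length : Int)),
   ("llm_plan_works", (((stats.map Prod.snd).filter (fun v => v == 1)).length : Int)),
   ("unsolved", (((stats.map Prod.snd).filter (fun v => v == 2)).length : Int)),
   ("axioms", (((stats.map Prod.snd).filter (fun v => v == -2)).length : Int))]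

-- ===== PORT B =====
-- Port of B: one counting pass building a dict, then five lookups.
def summary_counts_py_alt (stats : List (String × Int)) : List (String × Int) :=
  let counts : PySem.Dict Int Int :=
    (stats.map Prod.snd).foldl (fun d v => d.modify v 0 (· + 1)) PySem.Dict.empty
  [("empty_proof_works", counts.getD (-1) 0),
   ("inductive_proof_sketch_works", counts.getD 0 0),
   ("llm_plan_works", counts.getD 1 0),
   ("unsolved", counts.getD 2 0),
   ("axioms", counts.getD (-2) 0)]

-- ===== PRECONDITION & SPEC =====
def Spec_summary_counts_py (stats : List (String × Int)) (out : List (String × Int)) : Prop := out = summary_counts_py_alt stats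
instance (stats : List (String × Int)) (out : List (String × Int)) : Decidable (Spec_summary_counts_py stats out) := by unfold Spec_summary_counts_py; infer_instance

-- ===== CLAIM (what is proved, stated in full; the proofs are below) =====
def Claim_equal_summary_counts_py : Prop := ∀ (stats : List (String × Int)), Dom_summary_counts_py stats → Spec_summary_counts_py stats (summary_counts_py stats)

-- ===== LEMMAS AND PROOFS =====

-- ===== VERDICT (by name: the statement is the Claim_ definition above) =====
theorem count_getD (vs : List Int) (k : Int) :
    (vs.foldl (fun d v => d.modify v 0 (· + 1)) PySem.Dict.empty).getD k 0
      = ((vs.filter (fun v => v == k)).length : Int) := by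
  rw [PySem.Dict.getD_foldl_modify_add_one, PySem.Dict.getD_empty]
  simp [List.count_eq_length_filter]

theorem summary_counts_py_spec : Claim_equal_summary_counts_py := by
  intro stats _
  unfold Spec_summary_counts_py summary_counts_py summary_counts_py_alt
  simp only [count_getD]
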